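-- pv_equiv track=rewrite | github.com/kudrmax/algorithmic-problems | yandex_studcamp_robots/c-gpt.py | minimize_deviation
-- ===== SOURCE A (Python) =====
-- def minimize_deviation(n, k, a):
--     # Сортируем список a
--     sorted_a = sorted(a)
--
--     # Получаем все уникальные значения в a
--     unique_a = sorted(set(a))
--
--     # Если количество уникальных значений уже меньше или равно k, то мы можем использовать их все
--     if len(unique_a) <= k:
--         return a
--
--     # Находим k значений, которые будут использоваться в последовательности b
--     # Берем середину всех возможных вариантов уникальных значений
--     best_k_values = unique_a[:k]
--
--     # Создаем итоговую последовательность b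
--     b = []
--
--     for ai in a:
--         # Подбираем ближайшее значение из best_k_values
--         closest_value = min(best_k_values, key=lambda x: abs(x - ai))
--         b.append(closest_value)
--
--     return b
-- ===== SOURCE B (Python) =====
-- from bisect import bisect_left
--
-- def minimize_deviation(n, k, a):
--     cands = sorted(set(a))
--     if len(cands) <= k:
--         return a
--     cands = cands[:k]
--     res = []
--     last = len(cands) - 1
--     for ai in a:
--         i = bisect_left(cands, ai)
--         if i == 0:
--             res.append(cands[0])
--         elif i > last:
--             res.append(cands[last])
--         else:
--             lo, hi = cands[i - 1], cands[i]
--             res.append(lo if ai - lo <= hi - ai else hi)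
--     return res
-- ===== Notes on version B (the rewrite author's own statement) =====
-- stated objective: faster
-- what changed: A finds each element's closest candidate by a linear min() scan over the k candidates; B binary-searches (bisect_left) the sorted candidate list once per element and compares only the two neighbours, tie-breaking to the smaller.
import Mathlib
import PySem

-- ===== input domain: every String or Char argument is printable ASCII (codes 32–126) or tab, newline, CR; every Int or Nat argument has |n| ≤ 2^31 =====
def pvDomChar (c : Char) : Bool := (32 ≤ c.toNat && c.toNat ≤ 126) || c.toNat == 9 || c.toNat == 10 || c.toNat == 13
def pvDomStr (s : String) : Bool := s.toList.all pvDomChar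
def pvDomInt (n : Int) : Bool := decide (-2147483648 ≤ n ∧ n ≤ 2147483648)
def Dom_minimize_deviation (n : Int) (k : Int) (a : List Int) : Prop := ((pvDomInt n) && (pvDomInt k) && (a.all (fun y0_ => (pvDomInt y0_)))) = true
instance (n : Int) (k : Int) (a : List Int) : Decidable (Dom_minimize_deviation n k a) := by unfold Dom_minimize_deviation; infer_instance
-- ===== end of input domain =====

-- B replaces A's per-element linear min() scan over the k candidates by a bisect_left binary search plus
-- a two-neighbour comparison (tie to the smaller candidate, matching min()'s first-match rule).

-- ===== PORT A =====
-- Python's min() raises ValueError on an empty sequence; the port yields the Option default 0 exactly there,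
-- and exactly those inputs are excluded by Pre_minimize_deviation.
def minimize_deviation (n : Int) (k : Int) (a : List Int) : List Int :=
  let _sorted_a := PySem.List.sorted a (fun x => x)  -- computed and never used, as in A
  let unique_a := PySem.List.sorted (PySem.Set.ofList a) (fun x => x)
  if (unique_a.length : Int) ≤ k then a
  else
    let best_k_values := PySem.List.slice unique_a none (some k)
    a.foldl (fun b ai => b ++ [(PySem.List.min? best_k_values (fun x => |x - ai|)).getD 0]) []

-- ===== PORT B =====
-- cands[0] / cands[last] raise IndexError in Python when the candidate slice is empty (outside Pre_);
-- the port yields pyGetD's default 0 there.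
def pvPick (cands : List Int) (last : Int) (ai : Int) : Int :=
  let i : Nat := PySem.List.bisectLeft cands ai
  if i = 0 then PySem.List.pyGetD cands 0 0
  else if last < (i : Int) then PySem.List.pyGetD cands last 0
  else
    let lo := PySem.List.pyGetD cands ((i : Int) - 1) 0
    let hi := PySem.List.pyGetD cands (i : Int) 0
    if ai - lo ≤ hi - ai then lo else hi

def minimize_deviation_alt (n : Int) (k : Int) (a : List Int) : List Int :=
  let cands := PySem.List.sorted (PySem.Set.ofList a) (fun x => x)
  if (cands.length : Int) ≤ k then a
  else
    let c := PySem.List.slice cands none (some k)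
    let last : Int := (c.length : Int) - 1
    a.map (fun ai => pvPick c last ai)

-- ===== PRECONDITION & SPEC =====
-- Pre_ excludes exactly the inputs where Python A raises ValueError (min() over the empty candidate
-- slice unique_a[:k], reached when a is nonempty, k < #distinct values and the slice clamps to length 0);
-- B raises IndexError on the same inputs.
def Pre_minimize_deviation (n : Int) (k : Int) (a : List Int) : Prop :=
  a = [] ∨ ((PySem.Set.ofList a).length : Int) ≤ k ∨ PySem.List.clampIdx (PySem.Set.ofList a).length k ≠ 0
instance (n : Int) (k : Int) (a : List Int) : Decidable (Pre_minimize_deviation n k a) := by unfold Pre_minimize_deviation; infer_instance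

def pvWitness_minimize_deviation : Int × Int × List Int := (3, 2, [1, 5, 9])

def Spec_minimize_deviation (n : Int) (k : Int) (a : List Int) (out : List Int) : Prop := out = minimize_deviation_alt n k a
instance (n : Int) (k : Int) (a : List Int) (out : List Int) : Decidable (Spec_minimize_deviation n k a out) := by unfold Spec_minimize_deviation; infer_instance

-- ===== CLAIM (what is proved, stated in full; the proofs are below) =====
def Claim_equal_minimize_deviation : Prop := ∀ (n : Int) (k : Int) (a : List Int), Dom_minimize_deviation n k a → Pre_minimize_deviation n k a → Spec_minimize_deviation n k a (minimize_deviation n k a)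

-- ===== LEMMAS AND PROOFS =====

-- Python's running minimum with an already-seen first element.
def pyMin1 (key : Int → Int) (b : Int) (t : List Int) : Int :=
  t.foldl (fun m x => if key x < key m then x else m) b

lemma min?_cons (key : Int → Int) : ∀ (t : List Int) (b : Int),
    PySem.List.min? (b :: t) key = some (pyMin1 key b t) := by
  intro t
  induction t with
  | nil => intro b; rfl
  | cons y t ih =>
    intro b
    by_cases h : key y < key b <;>
      · have e : PySem.List.min? (b :: y :: t) key = PySem.List.min? ((if key y < key b then y else b) :: t) key := by
          simp [PySem.List.min?, List.foldl, h]
        rw [e]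
        simp only [h, if_true, if_false]
        rw [ih]
        simp [pyMin1, List.foldl, h]

-- On a strictly increasing list, the first key-minimum is determined by:
-- it minimises the key, and anything strictly smaller in value has strictly larger key.
lemma pyMin1_eq (key : Int → Int) :
    ∀ (t : List Int) (x p : Int), p ∈ x :: t →
      (∀ y ∈ x :: t, key p ≤ key y) →
      (∀ y ∈ x :: t, y < p → key p < key y) →
      List.Pairwise (· < ·) (x :: t) →
      pyMin1 key x t = p := by
  intro t
  induction t with
  | nil =>
    intro x p hmem _ _ _
    simp only [pyMin1, List.foldl]
    exact (List.mem_singleton.mp hmem).symm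
  | cons y t ih =>
    intro x p hmem hmin hfirst hpw
    have hxy : x < y := by
      rcases List.pairwise_cons.mp hpw with ⟨hx, _⟩
      exact hx y (by simp)
    have hpw' : List.Pairwise (· < ·) ((if key y < key x then y else x) :: t) := by
      rcases List.pairwise_cons.mp hpw with ⟨hx, hyt⟩
      rcases List.pairwise_cons.mp hyt with ⟨hy, ht⟩
      split
      · exact List.pairwise_cons.mpr ⟨hy, ht⟩
      · exact List.pairwise_cons.mpr ⟨fun z hz => hx z (by simp [hz]), ht⟩
    have hsub : ∀ z, z ∈ (if key y < key x then y else x) :: t → z ∈ x :: y :: t := by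
      intro z hz
      rcases List.mem_cons.mp hz with hz | hz
      · split at hz <;> simp [hz]
      · simp [hz]
    have hmem' : p ∈ (if key y < key x then y else x) :: t := by
      rcases List.mem_cons.mp hmem with hp | hp
      · -- p = x : the running element stays x, for key y < key x would contradict minimality
        have hkxy : ¬ key y < key x := by
          intro h
          exact absurd (hmin y (by simp)) (by rw [hp]; omega)
        simp [hp, hkxy]
      · rcases List.mem_cons.mp hp with hp | hp
        · -- p = y : then key y < key x strictly (a tie would contradict the first-match rule at x)
          have hxp : x < p := by omega
          have hkp : key p < key x := by
            rcases eq_or_lt_of_le (hmin x (by simp)) with h | h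
            · exact absurd (hfirst x (by simp) hxp) (by omega)
            · exact h
          have hkyx : key y < key x := by rw [← hp]; exact hkp
          simp [hp, hkyx]
        · simp [hp]
    have := ih (if key y < key x then y else x) p hmem'
      (fun z hz => hmin z (hsub z hz)) (fun z hz => hfirst z (hsub z hz)) hpw'
    simpa [pyMin1] using this

-- per-element crux: on a nonempty strictly increasing candidate list, Python's
-- min(c, key=|·-ai|) equals B's bisect-and-compare pick.
lemma pick_eq (c : List Int) (hne : c ≠ []) (hs : List.Pairwise (· < ·) c) (ai : Int) :
    (PySem.List.min? c (fun z => |z - ai|)).getD 0 = pvPick c ((c.length : Int) - 1) ai := by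
  have hle : List.Pairwise (· ≤ ·) c := hs.imp (fun h => le_of_lt h)
  obtain ⟨hiLen, hLt, hGe⟩ := PySem.List.bisectLeft_spec c ai hle
  have hmono : ∀ (p q : Nat) (hp : p < c.length) (hq : q < c.length), p ≤ q →
      GetElem.getElem c p hp ≤ GetElem.getElem c q hq := by
    intro p q hp hq hpq
    rcases eq_or_lt_of_le hpq with rfl | h
    · exact le_rfl
    · exact le_of_lt (List.pairwise_iff_getElem.mp hs p q hp hq h)
  have hN : 0 < c.length := List.length_pos_of_ne_nil hne
  set iN := PySem.List.bisectLeft c ai with hiN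
  have hp3 : pvPick c ((c.length : Int) - 1) ai ∈ c ∧
      (∀ y ∈ c, |pvPick c ((c.length : Int) - 1) ai - ai| ≤ |y - ai|) ∧
      (∀ y ∈ c, y < pvPick c ((c.length : Int) - 1) ai → |pvPick c ((c.length : Int) - 1) ai - ai| < |y - ai|) := by
    by_cases h0 : iN = 0
    · -- ai is ≤ every candidate: B picks the head
      have hp : pvPick c ((c.length : Int) - 1) ai = GetElem.getElem c 0 hN := by
        simp only [pvPick, ← hiN, h0, if_true]
        rw [PySem.List.pyGetD_eq_getElem c 0 (by norm_num) (by exact_mod_cast hN)]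
        simp
      have hall : ∀ (j : Nat) (hj : j < c.length), ai ≤ GetElem.getElem c j hj :=
        fun j hj => hGe j hj (by omega)
      rw [hp]
      refine ⟨List.getElem_mem _, ?_, ?_⟩
      · intro y hy
        obtain ⟨j, hj, rfl⟩ := List.mem_iff_getElem.mp hy
        have h1 := hall 0 hN
        have h2 := hall j hj
        have h3 := hmono 0 j hN hj (by omega)
        rcases abs_cases (GetElem.getElem c 0 hN - ai) with ⟨e1, _⟩ | ⟨e1, _⟩ <;>
          rcases abs_cases (GetElem.getElem c j hj - ai) with ⟨e2, _⟩ | ⟨e2, _⟩ <;>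
            rw [e1, e2] <;> omega
      · intro y hy hlt
        obtain ⟨j, hj, rfl⟩ := List.mem_iff_getElem.mp hy
        exact absurd hlt (not_lt.mpr (hmono 0 j hN hj (by omega)))
    · by_cases hLast : (c.length : Int) - 1 < (iN : Int)
      · -- ai is > every candidate: B picks the last
        have hL : c.length - 1 < c.length := by omega
        have hp : pvPick c ((c.length : Int) - 1) ai = GetElem.getElem c (c.length - 1) hL := by
          simp only [pvPick, ← hiN, h0, if_false, hLast, if_true]
          rw [PySem.List.pyGetD_eq_getElem c 0 (by omega) (by omega)]
          congr 1
          omega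
        have hall : ∀ (j : Nat) (hj : j < c.length), GetElem.getElem c j hj < ai :=
          fun j hj => hLt j hj (by omega)
        rw [hp]
        refine ⟨List.getElem_mem _, ?_, ?_⟩
        · intro y hy
          obtain ⟨j, hj, rfl⟩ := List.mem_iff_getElem.mp hy
          have h1 := hall (c.length - 1) hL
          have h2 := hall j hj
          have h3 := hmono j (c.length - 1) hj hL (by omega)
          rcases abs_cases (GetElem.getElem c (c.length - 1) hL - ai) with ⟨e1, _⟩ | ⟨e1, _⟩ <;>
            rcases abs_cases (GetElem.getElem c j hj - ai) with ⟨e2, _⟩ | ⟨e2, _⟩ <;>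
              rw [e1, e2] <;> omega
        · intro y hy hlt
          obtain ⟨j, hj, rfl⟩ := List.mem_iff_getElem.mp hy
          have h1 := hall (c.length - 1) hL
          have h2 := hall j hj
          rcases abs_cases (GetElem.getElem c (c.length - 1) hL - ai) with ⟨e1, _⟩ | ⟨e1, _⟩ <;>
            rcases abs_cases (GetElem.getElem c j hj - ai) with ⟨e2, _⟩ | ⟨e2, _⟩ <;>
              rw [e1, e2] <;> omega
      · -- interior: B compares the two neighbours c[iN-1] < ai ≤ c[iN]
        have hiLt : iN < c.length := by omega
        have hi1 : iN - 1 < c.length := by omega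
        have hlo : GetElem.getElem c (iN - 1) hi1 < ai := hLt (iN - 1) hi1 (by omega)
        have hhi : ai ≤ GetElem.getElem c iN hiLt := hGe iN hiLt (by omega)
        have hglo : PySem.List.pyGetD c ((iN : Int) - 1) 0 = GetElem.getElem c (iN - 1) hi1 := by
          rw [PySem.List.pyGetD_eq_getElem c 0 (by omega) (by omega)]
          congr 1
          omega
        have hghi : PySem.List.pyGetD c (iN : Int) 0 = GetElem.getElem c iN hiLt := by
          rw [PySem.List.pyGetD_eq_getElem c 0 (by omega) (by omega)]
          simp
        have hsplit : ∀ (j : Nat) (hj : j < c.length),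
            (GetElem.getElem c j hj ≤ GetElem.getElem c (iN - 1) hi1 ∧ GetElem.getElem c j hj < ai) ∨
            (GetElem.getElem c iN hiLt ≤ GetElem.getElem c j hj ∧ ai ≤ GetElem.getElem c j hj) := by
          intro j hj
          by_cases hji : j < iN
          · exact Or.inl ⟨hmono j (iN - 1) hj hi1 (by omega), hLt j hj hji⟩
          · exact Or.inr ⟨hmono iN j hiLt hj (by omega), hGe j hj (by omega)⟩
        have hp : pvPick c ((c.length : Int) - 1) ai =
            (if ai - GetElem.getElem c (iN - 1) hi1 ≤ GetElem.getElem c iN hiLt - ai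
              then GetElem.getElem c (iN - 1) hi1 else GetElem.getElem c iN hiLt) := by
          simp only [pvPick, ← hiN, h0, if_false, hLast, hglo, hghi]
        rw [hp]
        by_cases htie : ai - GetElem.getElem c (iN - 1) hi1 ≤ GetElem.getElem c iN hiLt - ai
        · rw [if_pos htie]
          refine ⟨List.getElem_mem _, ?_, ?_⟩
          · intro y hy
            obtain ⟨j, hj, rfl⟩ := List.mem_iff_getElem.mp hy
            rcases hsplit j hj with ⟨h1, h2⟩ | ⟨h1, h2⟩ <;>
              rcases abs_cases (GetElem.getElem c (iN - 1) hi1 - ai) with ⟨e1, _⟩ | ⟨e1, _⟩ <;>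
                rcases abs_cases (GetElem.getElem c j hj - ai) with ⟨e2, _⟩ | ⟨e2, _⟩ <;>
                  rw [e1, e2] <;> omega
          · intro y hy hlt
            obtain ⟨j, hj, rfl⟩ := List.mem_iff_getElem.mp hy
            rcases hsplit j hj with ⟨h1, h2⟩ | ⟨h1, h2⟩ <;>
              rcases abs_cases (GetElem.getElem c (iN - 1) hi1 - ai) with ⟨e1, _⟩ | ⟨e1, _⟩ <;>
                rcases abs_cases (GetElem.getElem c j hj - ai) with ⟨e2, _⟩ | ⟨e2, _⟩ <;>
                  rw [e1, e2] <;> omega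
        · rw [if_neg htie]
          refine ⟨List.getElem_mem _, ?_, ?_⟩
          · intro y hy
            obtain ⟨j, hj, rfl⟩ := List.mem_iff_getElem.mp hy
            rcases hsplit j hj with ⟨h1, h2⟩ | ⟨h1, h2⟩ <;>
              rcases abs_cases (GetElem.getElem c iN hiLt - ai) with ⟨e1, _⟩ | ⟨e1, _⟩ <;>
                rcases abs_cases (GetElem.getElem c j hj - ai) with ⟨e2, _⟩ | ⟨e2, _⟩ <;>
                  rw [e1, e2] <;> omega
          · intro y hy hlt
            obtain ⟨j, hj, rfl⟩ := List.mem_iff_getElem.mp hy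
            rcases hsplit j hj with ⟨h1, h2⟩ | ⟨h1, h2⟩ <;>
              rcases abs_cases (GetElem.getElem c iN hiLt - ai) with ⟨e1, _⟩ | ⟨e1, _⟩ <;>
                rcases abs_cases (GetElem.getElem c j hj - ai) with ⟨e2, _⟩ | ⟨e2, _⟩ <;>
                  rw [e1, e2] <;> omega
  obtain ⟨hmem, hmin, hfirst⟩ := hp3
  obtain ⟨x, t, rfl⟩ := List.exists_cons_of_ne_nil hne
  rw [min?_cons, Option.getD_some]
  exact pyMin1_eq (fun z => |z - ai|) t x _ hmem hmin hfirst hs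

-- ===== VERDICT (by name: the statement is the Claim_ definition above) =====
theorem minimize_deviation_spec : Claim_equal_minimize_deviation := by
  intro n k a _hdom hpre
  unfold Spec_minimize_deviation minimize_deviation minimize_deviation_alt
  set cands := PySem.List.sorted (PySem.Set.ofList a) (fun x => x) with hcands
  by_cases hk : (cands.length : Int) ≤ k
  · simp [hk]
  · simp only [hk, if_false]
    rw [PySem.List.foldl_append_singleton_eq_map]
    simp only [List.nil_append]
    rcases eq_or_ne a [] with rfl | hane
    · simp
    · set c := PySem.List.slice cands none (some k) with hc
      have hlenc : cands.length = (PySem.Set.ofList a).length :=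
        PySem.List.length_sorted (PySem.Set.ofList a) (fun x => x) false
      have hclamp : PySem.List.clampIdx (PySem.Set.ofList a).length k ≠ 0 := by
        rcases hpre with h | h | h
        · exact absurd h hane
        · exact absurd (by rw [hlenc]; exact h) hk
        · exact h
      have hcands_ne : cands ≠ [] := by
        obtain ⟨x, t, rfl⟩ := List.exists_cons_of_ne_nil hane
        have : x ∈ PySem.Set.ofList (x :: t) := (PySem.Set.mem_ofList _ _).mpr (by simp)
        intro hnil
        rw [List.eq_nil_iff_length_eq_zero, hlenc] at hnil
        exact absurd (List.length_pos_of_mem this) (by omega)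
      have hctake : c = List.take (PySem.List.clampIdx cands.length k) cands := by
        simp [hc, PySem.List.slice]
      have hcne : c ≠ [] := by
        rw [hctake, List.ne_nil_iff_length_pos, List.length_take]
        have h1 : 0 < cands.length := List.length_pos_of_ne_nil hcands_ne
        rw [hlenc] at *
        omega
      have hcpw : List.Pairwise (· < ·) c := by
        rw [hctake]
        exact List.Pairwise.take (PySem.List.sorted_ofList_pairwise_lt a)
      exact List.map_congr_left (fun ai _ => pick_eq c hcne hcpw ai)
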